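-- pv_equiv track=rewrite | github.com/sebvoigtlaender/high_precision_real_time_tracking | general_utils.py | contiguous_idx_blocks
-- ===== SOURCE A (Python) =====
-- from typing import Any, List, Mapping, MutableMapping, Optional, Tuple, Union
--
-- def contiguous_idx_blocks(idx_list: List[int],
--                           min_len: Optional[int] = 100) -> List[List[int]]:
--
--     '''
--     Return list of lists of contiguous index blocks of minimum length
--     specified by min_len.
--     Keep in mind that we keep the first index of each continuous index
--     block - when calling cross_validate() the ground truth is indexed
--     by the first index of each block. cross_validate() accounts for
--     the possibility of an empty list.
--
--     Args:
--         idx_list: list of indices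
--         min_len: minimum length of contiguous index block, if len(block) < min_len it is excluded
--         from the final list.
--
--     Returns:
--         block_list: list of lists of contiguous indices
--
--     Example:
--     min_len = 3
--     input = [1, 2, 3, 5, 6, 8, 9, 10]
--     output = [[1, 2, 3], [8, 9, 10]]
--     '''
--
--     start_idx = idx_list[0]
--     stop_idx = idx_list[0]
--     block_list = []
--     idx_block = []
--
--     for idx in idx_list[1:]:
--         if idx == stop_idx + 1:
--             stop_idx = idx
--             if not start_idx == idx:
--                 idx_block.append(idx)
--             continue
--         elif not idx == stop_idx + 1:
--             len_block = stop_idx - start_idx + 1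
--             idx_block.insert(0, start_idx)
--             if len_block >= min_len:
--                 block_list.append(idx_block)
--             start_idx = idx
--             stop_idx = idx
--             idx_block = []
--     if stop_idx == idx_list[-1]:
--         len_block = stop_idx - start_idx + 1
--         if len_block >= min_len:
--             idx_block.insert(0, start_idx)
--             block_list.append(idx_block)
--     return block_list
-- ===== SOURCE B (Python) =====
-- from typing import List, Optional
--
-- def contiguous_idx_blocks(idx_list: List[int],
--                           min_len: Optional[int] = 100) -> List[List[int]]:
--     # Boundaries-first decomposition: compute all break positions, then cut the
--     # list into slices at those positions and keep the slices whose value span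
--     # reaches min_len.
--     n = len(idx_list)
--     cuts = [0] + [i for i in range(1, n) if idx_list[i] != idx_list[i - 1] + 1] + [n]
--     out = []
--     for a, b in zip(cuts, cuts[1:]):
--         block = idx_list[a:b]
--         if block[-1] - block[0] + 1 >= min_len:
--             out.append(block)
--     return out
-- ===== Notes on version B (the rewrite author's own statement) =====
-- stated objective: alternative
-- what changed: A builds blocks incrementally in one loop with start/stop counters, insert(0) and a trailing flush; B first computes the list of break positions (cuts) with a range comprehension, then materialises each block as a slice idx_list[a:b] between adjacent cuts and keeps those whose value span reaches min_len.
import Mathlib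
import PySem

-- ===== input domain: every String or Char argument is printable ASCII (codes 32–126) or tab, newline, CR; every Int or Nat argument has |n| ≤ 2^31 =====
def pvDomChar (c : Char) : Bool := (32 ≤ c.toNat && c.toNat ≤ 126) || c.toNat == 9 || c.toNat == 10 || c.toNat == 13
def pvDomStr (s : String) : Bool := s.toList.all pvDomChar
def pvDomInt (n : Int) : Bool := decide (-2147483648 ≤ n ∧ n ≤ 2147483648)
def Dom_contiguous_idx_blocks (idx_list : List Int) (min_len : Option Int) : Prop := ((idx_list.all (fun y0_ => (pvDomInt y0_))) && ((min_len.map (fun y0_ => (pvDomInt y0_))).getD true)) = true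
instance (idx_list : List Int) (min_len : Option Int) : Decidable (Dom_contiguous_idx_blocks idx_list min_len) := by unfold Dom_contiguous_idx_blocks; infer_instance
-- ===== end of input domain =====

-- B computes the break positions first, then cuts the list into slices between
-- adjacent break positions and filters them by value span; same O(n) cost, a
-- boundaries-then-slices decomposition instead of A's incremental single loop.

-- `x >= m` for m : Option Int; Python raises TypeError for None (excluded by Pre_)
def pyGeOpt (x : Int) (m : Option Int) : Bool :=
  match m with
  | some v => decide (v ≤ x)
  | none => false

-- ===== PORT A =====
-- the loop body of A: state (start_idx, stop_idx, block_list, idx_block)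
def cibStepA (m : Option Int) (s : Int × Int × List (List Int) × List Int) (idx : Int) :
    Int × Int × List (List Int) × List Int :=
  if idx = s.2.1 + 1 then
    (s.1, idx, s.2.2.1, if ¬ (s.1 = idx) then s.2.2.2 ++ [idx] else s.2.2.2)
  else
    -- idx_block.insert(0, start_idx) = cons
    (idx, idx, if pyGeOpt (s.2.1 - s.1 + 1) m then s.2.2.1 ++ [s.1 :: s.2.2.2] else s.2.2.1, [])

def contiguous_idx_blocks (idx_list : List Int) (min_len : Option Int) : List (List Int) :=
  match idx_list with
  | [] => []   -- Python raises IndexError here (idx_list[0]); excluded by Pre_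
  | x :: rest =>
    let s := rest.foldl (cibStepA min_len) (x, x, [], [])
    if PySem.List.pyGet? idx_list (-1) = some s.2.1 then
      if pyGeOpt (s.2.1 - s.1 + 1) min_len then s.2.2.1 ++ [s.1 :: s.2.2.2] else s.2.2.1
    else s.2.2.1

-- ===== PORT B =====
def contiguous_idx_blocks_alt (idx_list : List Int) (min_len : Option Int) : List (List Int) :=
  let n : Int := idx_list.length
  -- cuts = [0] + [i for i in range(1, n) if idx_list[i] != idx_list[i-1] + 1] + [n]
  let cuts : List Int :=
    [0] ++ (PySem.List.pyRange 1 n 1).filter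
      (fun i => ¬ (PySem.List.pyGetD idx_list i 0 = PySem.List.pyGetD idx_list (i - 1) 0 + 1)) ++ [n]
  -- for a, b in zip(cuts, cuts[1:]): block = idx_list[a:b]; keep if span >= min_len
  let blocks := (cuts.zip (PySem.List.slice cuts (some 1) none)).map
      (fun p => PySem.List.slice idx_list (some p.1) (some p.2))
  blocks.filter (fun b =>
    pyGeOpt (PySem.List.pyGetD b (-1) 0 - PySem.List.pyGetD b 0 0 + 1) min_len)

-- ===== PRECONDITION & SPEC =====
-- Pre_ excludes exactly the inputs on which Python A raises: the empty list
-- (IndexError at idx_list[0]) and min_len = None (TypeError in the >= comparison,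
-- which is always reached). Python B raises on exactly the same inputs.
def Pre_contiguous_idx_blocks (idx_list : List Int) (min_len : Option Int) : Prop :=
  idx_list ≠ [] ∧ min_len ≠ none
instance (idx_list : List Int) (min_len : Option Int) : Decidable (Pre_contiguous_idx_blocks idx_list min_len) := by unfold Pre_contiguous_idx_blocks; infer_instance

def pvWitness_contiguous_idx_blocks : List Int × Option Int := ([1, 2, 3, 5, 6, 8, 9, 10], some 3)

def Spec_contiguous_idx_blocks (idx_list : List Int) (min_len : Option Int) (out : List (List Int)) : Prop := out = contiguous_idx_blocks_alt idx_list min_len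
instance (idx_list : List Int) (min_len : Option Int) (out : List (List Int)) : Decidable (Spec_contiguous_idx_blocks idx_list min_len out) := by unfold Spec_contiguous_idx_blocks; infer_instance

-- ===== CLAIM (what is proved, stated in full; the proofs are below) =====
def Claim_equal_contiguous_idx_blocks : Prop := ∀ (idx_list : List Int) (min_len : Option Int), Dom_contiguous_idx_blocks idx_list min_len → Pre_contiguous_idx_blocks idx_list min_len → Spec_contiguous_idx_blocks idx_list min_len (contiguous_idx_blocks idx_list min_len)

-- ===== LEMMAS AND PROOFS =====

-- proof-side intermediate: the maximal runs, built left to right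
def cibStepB (rs : List (List Int)) (pc : Int × Int) : List (List Int) :=
  if pc.2 = pc.1 + 1 then rs.dropLast ++ [rs.getLastD [] ++ [pc.2]]
  else rs ++ [[pc.2]]

-- [a+1, a+2, ..., a+n]
def cibSeg (a : Int) : Nat → List Int
  | 0 => []
  | n + 1 => cibSeg a n ++ [a + (n + 1)]

theorem run_snoc (a : Int) (n : Nat) :
    a :: cibSeg a (n + 1) = (a :: cibSeg a n) ++ [a + (n + 1)] := by
  simp [cibSeg]

theorem run_getLast? (a : Int) (n : Nat) : (a :: cibSeg a n).getLast? = some (a + n) := by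
  cases n with
  | zero => simp [cibSeg]
  | succ n =>
    rw [run_snoc]
    simp only [List.getLast?_concat, Option.some.injEq]
    push_cast; ring

theorem run_pyGetD_last (a : Int) (n : Nat) :
    PySem.List.pyGetD (a :: cibSeg a n) (-1) 0 = a + n := by
  have h : (a :: cibSeg a n) ≠ [] := by simp
  rw [PySem.List.pyGetD_neg_one _ 0 h]
  exact Option.some.inj (((List.getLast?_eq_some_getLast h).symm).trans (run_getLast? a n))

theorem stepB_nonempty (rs : List (List Int)) (p : Int × Int) :
    cibStepB rs p ≠ [] := by
  unfold cibStepB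
  split_ifs <;> simp

theorem stepB_append (d rs : List (List Int)) (p : Int × Int) (h : rs ≠ []) :
    cibStepB (d ++ rs) p = d ++ cibStepB rs p := by
  unfold cibStepB
  split_ifs with hc
  · have hlast : (d ++ rs).getLastD [] = rs.getLastD [] := by
      rw [List.getLastD_eq_getLast?, List.getLastD_eq_getLast?,
        List.getLast?_append_of_ne_nil d h]
    rw [List.dropLast_append_of_ne_nil h, hlast]
    simp
  · simp

theorem foldB_append (ps : List (Int × Int)) (d rs : List (List Int)) (h : rs ≠ []) :
    List.foldl cibStepB (d ++ rs) ps = d ++ List.foldl cibStepB rs ps := by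
  induction ps generalizing rs with
  | nil => rfl
  | cons p ps ih =>
    simp only [List.foldl_cons]
    rw [stepB_append d rs p h, ih _ (stepB_nonempty rs p)]

-- the core invariant: A's flush-as-you-go loop against runs-then-filter
theorem cib_main (m : Option Int) (r : List Int) : ∀ (a : Int) (k : Nat) (bl : List (List Int)),
    (let s := List.foldl (cibStepA m) (a, a + k, bl, cibSeg a k) r
     if pyGeOpt (s.2.1 - s.1 + 1) m then s.2.2.1 ++ [s.1 :: s.2.2.2] else s.2.2.1)
    = bl ++ (List.foldl cibStepB [a :: cibSeg a k] (List.zip ((a + k) :: r) r)).filter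
        (fun t => pyGeOpt (PySem.List.pyGetD t (-1) 0 - PySem.List.pyGetD t 0 0 + 1) m) := by
  induction r with
  | nil =>
    intro a k bl
    simp only [List.foldl_nil, List.zip_nil_right, List.filter_singleton,
      run_pyGetD_last, PySem.List.pyGetD_zero_cons]
    have h3 : a + (k : Int) - a + 1 = (k : Int) + 1 := by ring
    rw [h3]
    split_ifs with h <;> simp [h]
  | cons c r ih =>
    intro a k bl
    simp only [List.zip_cons_cons, List.foldl_cons]
    by_cases hc : c = a + k + 1
    · have hstep : cibStepA m (a, a + k, bl, cibSeg a k) c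
          = (a, a + (k + 1 : Nat), bl, cibSeg a (k + 1)) := by
        unfold cibStepA
        simp only [hc]
        have hne : ¬ (a = a + (k : Int) + 1) := by omega
        simp [hne, cibSeg]
        ring
      have hstepB : cibStepB [a :: cibSeg a k] (a + k, c) = [a :: cibSeg a (k + 1)] := by
        unfold cibStepB
        simp only [hc]
        rw [run_snoc]
        simp
        ring
      rw [hstep, hstepB, ih a (k + 1) bl]
      have hc2 : a + ((k + 1 : Nat) : Int) = c := by rw [hc]; push_cast; ring
      rw [hc2]
    · have hstep : cibStepA m (a, a + k, bl, cibSeg a k) c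
          = (c, c, if pyGeOpt ((k : Int) + 1) m then bl ++ [a :: cibSeg a k] else bl, []) := by
        unfold cibStepA
        have h1 : ¬ (c = a + (k : Int) + 1) := hc
        have h2 : a + (k : Int) - a + 1 = (k : Int) + 1 := by ring
        simp only [h1, if_false, h2]
      have hstepB : cibStepB [a :: cibSeg a k] (a + k, c) = [a :: cibSeg a k] ++ [[c]] := by
        unfold cibStepB
        have h1 : ¬ (c = a + (k : Int) + 1) := hc
        simp [h1]
      rw [hstep, hstepB, foldB_append _ _ _ (by simp)]
      have hIH := ih c 0 (if pyGeOpt ((k : Int) + 1) m then bl ++ [a :: cibSeg a k] else bl)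
      simp only [Nat.cast_zero, add_zero, cibSeg] at hIH
      rw [hIH, List.filter_append]
      simp only [List.filter_singleton, run_pyGetD_last, PySem.List.pyGetD_zero_cons]
      have h3 : a + (k : Int) - a + 1 = (k : Int) + 1 := by ring
      rw [h3]
      split_ifs with h <;> simp [h]

-- the stop_idx component after the loop is the last element processed
theorem foldA_stop (m : Option Int) (r : List Int) :
    ∀ (st p : Int) (bl : List (List Int)) (ib : List Int),
    (List.foldl (cibStepA m) (st, p, bl, ib) r).2.1 = r.getLastD p := by
  induction r with
  | nil => intro st p bl ib; rfl
  | cons c r ih =>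
    intro st p bl ib
    simp only [List.foldl_cons, List.getLastD_cons]
    unfold cibStepA
    split_ifs <;> exact ih _ _ _ _

theorem pyGet?_cons_neg_one (x : Int) (rest : List Int) :
    PySem.List.pyGet? (x :: rest) (-1) = some (rest.getLastD x) := by
  rw [PySem.List.pyGet?_neg_one]
  induction rest generalizing x with
  | nil => simp
  | cons y r ih => rw [List.getLast?_cons_cons, ih y, List.getLastD_cons]

-- ===== bridging B's cuts-and-slices shape to the run fold =====

-- inner break positions of l and the slice list B builds
def cibInner (l : List Int) : List Int :=
  (PySem.List.pyRange 1 (l.length : Int) 1).filter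
    (fun i => ¬ (PySem.List.pyGetD l i 0 = PySem.List.pyGetD l (i - 1) 0 + 1))

def cibSlices (l : List Int) : List (List Int) :=
  (([0] ++ cibInner l ++ [(l.length : Int)]).zip
      ([0] ++ cibInner l ++ [(l.length : Int)]).tail).map
    (fun p : Int × Int => PySem.List.slice l (some p.1) (some p.2))

theorem adjPairs_snoc {α : Type} (l : List α) (y : α) (h : l ≠ []) :
    (l ++ [y]).zip (l ++ [y]).tail = l.zip l.tail ++ [(l.getLast h, y)] := by
  induction l with
  | nil => exact absurd rfl h
  | cons a l ih =>
    cases l with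
    | nil => simp
    | cons b l =>
      have hih := ih (by simp)
      simp only [List.cons_append, List.tail_cons, List.zip_cons_cons] at hih ⊢
      simp [hih]

theorem mem_cibInner {l : List Int} {i : Int} (h : i ∈ cibInner l) :
    1 ≤ i ∧ i < (l.length : Int) := by
  have := List.mem_filter.mp h
  exact (PySem.List.mem_pyRange_one).mp this.1

-- appending y does not change slices whose bounds stay inside l
theorem slice_append_of_le (l : List Int) (y a b : Int) (ha : 0 ≤ a)
    (hal : a ≤ (l.length : Int)) (hb : 0 ≤ b) (hbl : b ≤ (l.length : Int)) :
    PySem.List.slice (l ++ [y]) (some a) (some b) = PySem.List.slice l (some a) (some b) := by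
  rw [PySem.List.slice_toNat _ ha hb, PySem.List.slice_toNat _ ha hb]
  rw [List.drop_append_of_le_length (by omega : a.toNat ≤ l.length)]
  rw [List.take_append]
  have : b.toNat - a.toNat - (l.drop a.toNat).length = 0 := by
    simp only [List.length_drop]; omega
  rw [this]
  simp

-- the slice running to the end of the list is a drop
theorem slice_drop_full (l : List Int) (a : Int) (ha : 0 ≤ a) :
    PySem.List.slice l (some a) (some (l.length : Int)) = l.drop a.toNat := by
  rw [PySem.List.slice_toNat _ ha (by positivity)]
  exact List.take_of_length_le (by simp)

theorem getD_last_sub_one (l : List Int) (h : l ≠ []) :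
    l.getD (l.length - 1) 0 = l.getLast h := by
  rw [List.getLast_eq_getElem,
    List.getD_eq_getElem (hn := by have := List.length_pos_of_ne_nil h; omega)]

theorem cibInner_snoc (l : List Int) (hl : l ≠ []) (y : Int) :
    cibInner (l ++ [y]) =
      cibInner l ++ (if y = l.getLast hl + 1 then [] else [(l.length : Int)]) := by
  have hN : 1 ≤ l.length := List.length_pos_of_ne_nil hl
  unfold cibInner
  have hlen : (((l ++ [y]).length) : Int) = (l.length : Int) + 1 := by
    simp
  rw [hlen, PySem.List.pyRange_one_succ_right (by exact_mod_cast hN), List.filter_append]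
  congr 1
  · apply List.filter_congr
    intro i hi
    obtain ⟨h1, h2⟩ := (PySem.List.mem_pyRange_one).mp hi
    obtain ⟨n, rfl⟩ : ∃ n : Nat, i = (n : Int) := ⟨i.toNat, by omega⟩
    have hn2 : n < l.length := by exact_mod_cast h2
    have hsub : ((n : Int)) - 1 = ((n - 1 : Nat) : Int) := by omega
    have e1 : PySem.List.pyGetD (l ++ [y]) (n : Int) 0 = PySem.List.pyGetD l (n : Int) 0 := by
      rw [PySem.List.pyGetD_natCast, PySem.List.pyGetD_natCast]
      exact List.getD_append _ _ _ _ hn2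
    have e2 : PySem.List.pyGetD (l ++ [y]) ((n : Int) - 1) 0
        = PySem.List.pyGetD l ((n : Int) - 1) 0 := by
      rw [hsub, PySem.List.pyGetD_natCast, PySem.List.pyGetD_natCast]
      exact List.getD_append _ _ _ _ (by omega)
    rw [e1, e2]
  · have hget_y : PySem.List.pyGetD (l ++ [y]) ((l.length : Nat) : Int) 0 = y := by
      rw [PySem.List.pyGetD_natCast]
      simp [List.getD]
    have hget_last : PySem.List.pyGetD (l ++ [y]) (((l.length : Nat) : Int) - 1) 0
        = l.getLast hl := by
      have hsub : ((l.length : Int)) - 1 = ((l.length - 1 : Nat) : Int) := by omega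
      rw [hsub, PySem.List.pyGetD_natCast,
        List.getD_append _ _ _ _ (by omega)]
      exact getD_last_sub_one l hl
    simp only [List.filter_singleton, hget_y, hget_last]
    split_ifs with h1 <;> simp_all

-- appending y either extends B's last slice (contiguous) or opens the slice [y]
theorem cibSlices_snoc (l : List Int) (hl : l ≠ []) (y : Int) :
    cibSlices (l ++ [y]) =
      if y = l.getLast hl + 1
      then (cibSlices l).dropLast ++ [(cibSlices l).getLastD [] ++ [y]]
      else cibSlices l ++ [[y]] := by
  have hbne : ([0] ++ cibInner l : List Int) ≠ [] := by simp
  have hbounds : ∀ i ∈ ([0] ++ cibInner l : List Int), 0 ≤ i ∧ i < (l.length : Int) := by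
    intro i hi
    rcases List.mem_append.mp hi with h | h
    · simp at h
      subst h
      exact ⟨le_refl 0, by exact_mod_cast List.length_pos_of_ne_nil hl⟩
    · have := mem_cibInner h; omega
  have hc := hbounds _ (List.getLast_mem hbne)
  have hlen : (((l ++ [y]).length) : Int) = (l.length : Int) + 1 := by simp
  have holdpairs := adjPairs_snoc ([0] ++ cibInner l) ((l.length : Int)) hbne
  have hold : cibSlices l
      = (([0] ++ cibInner l : List Int).zip ([0] ++ cibInner l : List Int).tail).map
          (fun p => PySem.List.slice l (some p.1) (some p.2))
        ++ [l.drop (([0] ++ cibInner l : List Int).getLast hbne).toNat] := by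
    unfold cibSlices
    rw [holdpairs, List.map_append, List.map_singleton,
      slice_drop_full l _ hc.1]
  have hstable : ∀ cs : List (Int × Int),
      (∀ p ∈ cs, 0 ≤ p.1 ∧ p.1 ≤ (l.length : Int) ∧ 0 ≤ p.2 ∧ p.2 ≤ (l.length : Int)) →
      cs.map (fun p => PySem.List.slice (l ++ [y]) (some p.1) (some p.2))
        = cs.map (fun p => PySem.List.slice l (some p.1) (some p.2)) := by
    intro cs hcs
    apply List.map_congr_left
    intro p hp
    obtain ⟨h1, h2, h3, h4⟩ := hcs p hp
    exact slice_append_of_le l y p.1 p.2 h1 h2 h3 h4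
  have hbase_pairs : ∀ p ∈ (([0] ++ cibInner l : List Int).zip
        ([0] ++ cibInner l : List Int).tail),
      0 ≤ p.1 ∧ p.1 ≤ (l.length : Int) ∧ 0 ≤ p.2 ∧ p.2 ≤ (l.length : Int) := by
    intro p hp
    obtain ⟨a, b⟩ := p
    obtain ⟨ha, hb⟩ := List.of_mem_zip hp
    have h1 := hbounds a ha
    have h2 := hbounds b (List.mem_of_mem_tail hb)
    exact ⟨h1.1, le_of_lt h1.2, h2.1, le_of_lt h2.2⟩
  by_cases hy : y = l.getLast hl + 1
  · rw [if_pos hy]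
    have hlast : PySem.List.slice (l ++ [y])
        (some (([0] ++ cibInner l : List Int).getLast hbne)) (some ((l.length : Int) + 1))
        = l.drop (([0] ++ cibInner l : List Int).getLast hbne).toNat ++ [y] := by
      rw [show ((l.length : Int) + 1) = (((l ++ [y]).length : Nat) : Int) by rw [hlen],
        slice_drop_full (l ++ [y]) _ hc.1,
        List.drop_append_of_le_length (by omega : (([0] ++ cibInner l : List Int).getLast hbne).toNat ≤ l.length)]
    have hnew : cibSlices (l ++ [y])
        = (([0] ++ cibInner l : List Int).zip ([0] ++ cibInner l : List Int).tail).map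
            (fun p => PySem.List.slice l (some p.1) (some p.2))
          ++ [l.drop (([0] ++ cibInner l : List Int).getLast hbne).toNat ++ [y]] := by
      unfold cibSlices
      rw [cibInner_snoc l hl y, if_pos hy, List.append_nil, hlen,
        adjPairs_snoc ([0] ++ cibInner l) ((l.length : Int) + 1) hbne,
        List.map_append, List.map_singleton, hstable _ hbase_pairs, hlast]
    rw [hnew, hold, List.dropLast_concat, List.getLastD_concat]
  · rw [if_neg hy]
    have hne2 : ([0] ++ cibInner l ++ [(l.length : Int)] : List Int) ≠ [] := by simp
    have hmid : PySem.List.slice (l ++ [y])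
        (some (([0] ++ cibInner l : List Int).getLast hbne)) (some ((l.length : Int)))
        = PySem.List.slice l
            (some (([0] ++ cibInner l : List Int).getLast hbne)) (some ((l.length : Int))) :=
      slice_append_of_le l y _ _ hc.1 (le_of_lt hc.2) (by positivity) (le_refl _)
    have hnewslice : PySem.List.slice (l ++ [y]) (some ((l.length : Int)))
        (some ((l.length : Int) + 1)) = [y] := by
      rw [show ((l.length : Int) + 1) = (((l ++ [y]).length : Nat) : Int) by rw [hlen],
        slice_drop_full (l ++ [y]) _ (by positivity)]
      rw [show ((l.length : Int)).toNat = l.length by omega, List.drop_left]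
    have hnew : cibSlices (l ++ [y])
        = ((([0] ++ cibInner l : List Int).zip ([0] ++ cibInner l : List Int).tail).map
            (fun p => PySem.List.slice l (some p.1) (some p.2))
          ++ [l.drop (([0] ++ cibInner l : List Int).getLast hbne).toNat]) ++ [[y]] := by
      unfold cibSlices
      rw [cibInner_snoc l hl y, if_neg hy, hlen]
      rw [show ([0] ++ (cibInner l ++ [(l.length : Int)]) ++ [(l.length : Int) + 1] : List Int)
          = (([0] ++ cibInner l ++ [(l.length : Int)]) ++ [(l.length : Int) + 1] : List Int) by simp]
      rw [adjPairs_snoc _ ((l.length : Int) + 1) hne2]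
      have hlast2 : ([0] ++ cibInner l ++ [(l.length : Int)] : List Int).getLast hne2
          = (l.length : Int) := by simp
      rw [hlast2, holdpairs, List.map_append, List.map_append, List.map_singleton,
        List.map_singleton, hstable _ hbase_pairs, hmid, hnewslice,
        slice_drop_full l _ hc.1]
    rw [hnew, hold]

-- B's slices coincide with the left-to-right run fold
theorem cibSlices_eq_fold (r : List Int) : ∀ (x : Int),
    cibSlices (x :: r) = List.foldl cibStepB [[x]] ((x :: r).zip r) := by
  induction r using List.reverseRecOn with
  | nil =>
    intro x
    unfold cibSlices cibInner
    rw [show (([x] : List Int).length : Int) = 1 by simp,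
      show PySem.List.pyRange 1 1 1 = [] from PySem.List.pyRange_one_eq_nil (le_refl 1)]
    simp only [List.filter_nil, List.append_nil]
    have h := PySem.List.slice_natCast (xs := [x]) (a := 0) (b := 1)
    norm_num at h
    simp [h]
  | append_singleton r y ih =>
    intro x
    have hcons : x :: (r ++ [y]) = (x :: r) ++ [y] := rfl
    rw [hcons, cibSlices_snoc (x :: r) (by simp) y]
    have hzip : ((x :: r) ++ [y]).zip (((x :: r) ++ [y]).tail)
        = (x :: r).zip r ++ [((x :: r).getLast (by simp), y)] := by
      rw [adjPairs_snoc (x :: r) y (by simp)]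
      simp only [List.tail_cons]
    rw [show ((x :: r) ++ [y]).zip (r ++ [y]) = ((x :: r) ++ [y]).zip (((x :: r) ++ [y]).tail)
        from rfl, hzip, List.foldl_append, List.foldl_cons, List.foldl_nil, ← ih x]
    unfold cibStepB
    by_cases hy : y = (x :: r).getLast (by simp) + 1
    · simp only [if_pos hy]
    · simp only [if_neg hy]

-- ===== VERDICT (by name: the statement is the Claim_ definition above) =====
theorem contiguous_idx_blocks_spec : Claim_equal_contiguous_idx_blocks := by
  intro idx_list min_len _ hpre
  unfold Spec_contiguous_idx_blocks
  obtain ⟨hne, -⟩ := hpre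
  match idx_list with
  | [] => exact absurd rfl hne
  | x :: rest =>
    unfold contiguous_idx_blocks contiguous_idx_blocks_alt
    have hB : ((([0] ++ cibInner (x :: rest) ++ [((x :: rest).length : Int)] : List Int).zip
          (([0] ++ cibInner (x :: rest) ++ [((x :: rest).length : Int)] : List Int).tail)).map
          (fun p => PySem.List.slice (x :: rest) (some p.1) (some p.2)))
        = List.foldl cibStepB [[x]] ((x :: rest).zip rest) := by
      have := cibSlices_eq_fold rest x
      unfold cibSlices at this
      exact this
    simp only [PySem.List.slice_from_one]
    rw [show ([0] ++ (PySem.List.pyRange 1 ((x :: rest).length : Int) 1).filter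
        (fun i => ¬ (PySem.List.pyGetD (x :: rest) i 0 = PySem.List.pyGetD (x :: rest) (i - 1) 0 + 1))
        ++ [((x :: rest).length : Int)] : List Int)
      = [0] ++ cibInner (x :: rest) ++ [((x :: rest).length : Int)] from by rw [cibInner]]
    rw [hB]
    have := cib_main min_len rest x 0 []
    simp only [Nat.cast_zero, add_zero, cibSeg, List.nil_append] at this
    rw [pyGet?_cons_neg_one, foldA_stop, if_pos rfl]
    rw [foldA_stop min_len rest x x [] []] at this
    exact this
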